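-- pv_equiv track=rewrite | github.com/guillaumepgt/hackathon | snake_agent.py | path_exists_wrap
-- ===== SOURCE A (Python) =====
-- from collections import deque
--
-- DIRS = {
--     "up": (-1, 0),
--     "down": (1, 0),
--     "left": (0, -1),
--     "right": (0, 1),
-- }
--
-- def wrap_pos(r: int, c: int, n: int) -> tuple[int, int]:
--     return (r % n, c % n)
--
-- def path_exists_wrap(start: tuple[int, int], target: tuple[int, int], blocked: set[tuple[int, int]], n: int) -> bool:
--     if start == target:
--         return True
--     q = deque([start])
--     seen = {start}
--     while q:
--         r, c = q.popleft()
--         for dr, dc in DIRS.values():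
--             nr, nc = wrap_pos(r + dr, c + dc, n)
--             nxt = (nr, nc)
--             if nxt == target:
--                 return True
--             if nxt in blocked or nxt in seen:
--                 continue
--             seen.add(nxt)
--             q.append(nxt)
--     return False
-- ===== SOURCE B (Python) =====
-- def path_exists_wrap(start, target, blocked, n):
--     if start == target:
--         return True
--     dirs = [(-1, 0), (1, 0), (0, -1), (0, 1)]
--     def nbrs(p):
--         return [((p[0] + dr) % n, (p[1] + dc) % n) for dr, dc in dirs]
--     reach = {start}
--     frontier = {start}
--     while frontier:
--         if any(target in nbrs(x) for x in frontier):
--             return True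
--         frontier = {y for x in frontier for y in nbrs(x) if y not in blocked} - reach
--         reach |= frontier
--     return False
-- ===== Notes on version B (the rewrite author's own statement) =====
-- stated objective: alternative
-- what changed: Replaces the deque-driven one-cell-at-a-time BFS with per-neighbor early return by a level-wise whole-frontier set-saturation loop: each round first tests once whether the target is wrap-adjacent to the current frontier, then expands the entire frontier as a set comprehension (no queue, no per-cell target check).
import Mathlib
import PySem

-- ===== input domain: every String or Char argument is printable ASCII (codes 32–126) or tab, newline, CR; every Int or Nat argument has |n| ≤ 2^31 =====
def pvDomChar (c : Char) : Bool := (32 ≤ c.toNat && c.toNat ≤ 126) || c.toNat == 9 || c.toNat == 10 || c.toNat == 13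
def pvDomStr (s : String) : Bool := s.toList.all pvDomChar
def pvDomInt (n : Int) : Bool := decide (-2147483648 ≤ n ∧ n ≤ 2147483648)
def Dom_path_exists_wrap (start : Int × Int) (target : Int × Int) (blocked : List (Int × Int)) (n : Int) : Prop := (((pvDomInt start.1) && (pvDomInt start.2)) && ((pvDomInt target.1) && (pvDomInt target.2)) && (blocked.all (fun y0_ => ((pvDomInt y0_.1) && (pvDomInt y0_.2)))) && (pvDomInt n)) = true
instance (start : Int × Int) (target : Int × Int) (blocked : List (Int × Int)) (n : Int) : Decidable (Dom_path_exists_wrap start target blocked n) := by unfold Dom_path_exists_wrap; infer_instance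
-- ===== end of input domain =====

-- B replaces A's queue-driven BFS with whole-frontier set saturation plus a final target-adjacency check (alternative decomposition, same cost).


-- ===== PORT A =====
-- DIRS.values() in insertion order: up, down, left, right
def pvDirs : List (Int × Int) := [(-1, 0), (1, 0), (0, -1), (0, 1)]

-- wrap_pos(r, c, n) = (r % n, c % n) with Python's mod
def pvWrap (n : Int) (p : Int × Int) : Int × Int := (PySem.Int.mod p.1 n, PySem.Int.mod p.2 n)

-- one step of A's inner `for dr, dc in DIRS.values()` loop; none = the `return True` fired.
-- Python's set `seen` is modelled by Std.HashSet (exact: only membership/insertion of pairs is used).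
def pvStep (target : Int × Int) (blocked : List (Int × Int)) (n : Int) (r c : Int)
    (acc : Option (List (Int × Int) × Std.HashSet (Int × Int))) (d : Int × Int) :
    Option (List (Int × Int) × Std.HashSet (Int × Int)) :=
  match acc with
  | none => none
  | some (q, seen) =>
    let nxt := pvWrap n (r + d.1, c + d.2)
    if nxt = target then none
    else if nxt ∈ blocked ∨ nxt ∈ seen then some (q, seen)
    else some (q ++ [nxt], seen.insert nxt)

-- A's `while q:` loop; fuel is only a totality guard (proved never exhausted under Pre_)
def pvBfs (target : Int × Int) (blocked : List (Int × Int)) (n : Int) :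
    Nat → List (Int × Int) → Std.HashSet (Int × Int) → Bool
  | 0, _, _ => false
  | _ + 1, [], _ => false
  | f + 1, p :: q', seen =>
    match pvDirs.foldl (pvStep target blocked n p.1 p.2) (some (q', seen)) with
    | none => true
    | some (q2, seen2) => pvBfs target blocked n f q2 seen2

def path_exists_wrap (start : Int × Int) (target : Int × Int) (blocked : List (Int × Int)) (n : Int) : Bool :=
  if start = target then true
  else pvBfs target blocked n (n.natAbs * n.natAbs + 2) [start] (Std.HashSet.ofList [start])

-- ===== PORT B =====
-- nbrs(p) = the four wrap-around neighbours of p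
def pvNbrs (n : Int) (p : Int × Int) : List (Int × Int) :=
  pvDirs.map (fun d => pvWrap n (p.1 + d.1, p.2 + d.2))

-- {y for x in frontier for y in nbrs(x) if y not in blocked} - reach, as a distinct-element list
def pvExpand (blocked : List (Int × Int)) (n : Int)
    (frontier : List (Int × Int)) (reach : Std.HashSet (Int × Int)) : List (Int × Int) :=
  frontier.foldl (fun acc x =>
    (pvNbrs n x).foldl (fun acc y =>
      if y ∈ blocked ∨ y ∈ reach ∨ y ∈ acc then acc else acc ++ [y]) acc) []

-- B's `while frontier:` saturation loop (adjacency test per level, then expand);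
-- fuel is only a totality guard (proved never exhausted under Pre_).
-- Python's set `reach` is modelled by Std.HashSet (exact: only membership/insertion of pairs is used).
def pvSatB (target : Int × Int) (blocked : List (Int × Int)) (n : Int) :
    Nat → List (Int × Int) → Std.HashSet (Int × Int) → Bool
  | 0, _, _ => false
  | f + 1, frontier, reach =>
    if frontier = [] then false
    else if frontier.any (fun x => target ∈ pvNbrs n x) then true
    else pvSatB target blocked n f (pvExpand blocked n frontier reach)
      ((pvExpand blocked n frontier reach).foldl (fun r y => r.insert y) reach)

def path_exists_wrap_alt (start : Int × Int) (target : Int × Int) (blocked : List (Int × Int)) (n : Int) : Bool :=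
  if start = target then true
  else pvSatB target blocked n (n.natAbs * n.natAbs + 3) [start] (Std.HashSet.ofList [start])

-- ===== PRECONDITION & SPEC =====
-- Pre_ excludes exactly the inputs where A raises ZeroDivisionError (n = 0 with start ≠ target); B raises there too.
def Pre_path_exists_wrap (start : Int × Int) (target : Int × Int) (blocked : List (Int × Int)) (n : Int) : Prop :=
  start = target ∨ n ≠ 0

instance (start : Int × Int) (target : Int × Int) (blocked : List (Int × Int)) (n : Int) : Decidable (Pre_path_exists_wrap start target blocked n) := by unfold Pre_path_exists_wrap; infer_instance

def pvWitness_path_exists_wrap : (Int × Int) × (Int × Int) × (List (Int × Int)) × Int := ((0, 0), (1, 1), [(0, 1)], 3)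

def Spec_path_exists_wrap (start : Int × Int) (target : Int × Int) (blocked : List (Int × Int)) (n : Int) (out : Bool) : Prop := out = path_exists_wrap_alt start target blocked n
instance (start : Int × Int) (target : Int × Int) (blocked : List (Int × Int)) (n : Int) (out : Bool) : Decidable (Spec_path_exists_wrap start target blocked n out) := by unfold Spec_path_exists_wrap; infer_instance

-- ===== CLAIM (what is proved, stated in full; the proofs are below) =====
def Claim_equal_path_exists_wrap : Prop := ∀ (start : Int × Int) (target : Int × Int) (blocked : List (Int × Int)) (n : Int), Dom_path_exists_wrap start target blocked n → Pre_path_exists_wrap start target blocked n → Spec_path_exists_wrap start target blocked n (path_exists_wrap start target blocked n)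

-- ===== LEMMAS AND PROOFS =====

-- the one-step relation of the wrap-grid graph, and the common reachability spec
def pvStepR (blocked : List (Int × Int)) (n : Int) (x y : Int × Int) : Prop :=
  y ∈ pvNbrs n x ∧ y ∉ blocked

def pvReach (start : Int × Int) (blocked : List (Int × Int)) (n : Int) (z : Int × Int) : Prop :=
  Relation.ReflTransGen (pvStepR blocked n) start z

def pvP (start target : Int × Int) (blocked : List (Int × Int)) (n : Int) : Prop :=
  ∃ x, pvReach start blocked n x ∧ target ∈ pvNbrs n x

-- the canonical residues of Python's % n, as a finset (explicit list construction: Finset.Ico on Int is noncomputable here)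
def pvLo (n : Int) : Int := if 0 < n then 0 else n + 1
def pvI (n : Int) : Finset Int := ((List.range n.natAbs).map (fun (k : Nat) => pvLo n + ((k : Nat) : Int))).toFinset

def pvCells (start : Int × Int) (n : Int) : Finset (Int × Int) :=
  insert start ((pvI n) ×ˢ (pvI n))

theorem pvI_mem (n a : Int) : a ∈ pvI n ↔ pvLo n ≤ a ∧ a < pvLo n + n.natAbs := by
  simp only [pvI, List.mem_toFinset, List.mem_map, List.mem_range]
  constructor
  · rintro ⟨k, hk, rfl⟩; constructor <;> omega
  · intro h; exact ⟨(a - pvLo n).toNat, by omega, by omega⟩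

theorem pvI_card (n : Int) : (pvI n).card = n.natAbs := by
  have hnd : ((List.range n.natAbs).map (fun (k : Nat) => pvLo n + ((k : Nat) : Int))).Nodup :=
    (List.nodup_range).map (fun a b h => by omega)
  rw [pvI, List.toFinset_card_of_nodup hnd, List.length_map, List.length_range]

theorem pvMod_mem_I (a n : Int) (hn : n ≠ 0) : PySem.Int.mod a n ∈ pvI n := by
  rw [pvI_mem]
  unfold pvLo
  rcases lt_or_gt_of_ne hn with h | h
  · have := PySem.Int.mod_neg_bounds a h
    rw [if_neg (by omega : ¬ 0 < n)]; omega
  · have h1 := PySem.Int.mod_nonneg a h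
    have h2 := PySem.Int.mod_lt a h
    rw [if_pos h]; omega

theorem pvWrap_mem_cells (p : Int × Int) (start : Int × Int) (n : Int) (hn : n ≠ 0) :
    pvWrap n p ∈ pvCells start n := by
  unfold pvCells pvWrap
  exact Finset.mem_insert_of_mem (Finset.mem_product.2 ⟨pvMod_mem_I _ _ hn, pvMod_mem_I _ _ hn⟩)

theorem pvCells_card_le (start : Int × Int) (n : Int) :
    (pvCells start n).card ≤ n.natAbs * n.natAbs + 1 := by
  have hI := pvI_card n
  calc (pvCells start n).card ≤ ((pvI n) ×ˢ (pvI n)).card + 1 := Finset.card_insert_le _ _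
    _ = n.natAbs * n.natAbs + 1 := by rw [Finset.card_product, hI]

theorem pvLen_le_card (l : List (Int × Int)) (s : Finset (Int × Int))
    (hnd : l.Nodup) (hsub : ∀ x ∈ l, x ∈ s) : l.length ≤ s.card := by
  have h1 : l.toFinset.card = l.length := List.toFinset_card_of_nodup hnd
  have h2 : l.toFinset ⊆ s := by intro x hx; exact hsub x (List.mem_toFinset.1 hx)
  calc l.length = l.toFinset.card := h1.symm
    _ ≤ s.card := Finset.card_le_card h2

theorem pvToList_nodup (m : Std.HashSet (Int × Int)) : m.toList.Nodup := by
  have h := Std.HashSet.distinct_toList (m := m)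
  exact h.imp (by intro a b hab; simpa using hab)

theorem pvSize_le_card (m : Std.HashSet (Int × Int)) (s : Finset (Int × Int))
    (hsub : ∀ x ∈ m, x ∈ s) : m.size ≤ s.card := by
  have h := pvLen_le_card m.toList s (pvToList_nodup m)
    (fun x hx => hsub x (Std.HashSet.mem_toList.1 hx))
  rwa [Std.HashSet.length_toList] at h

theorem pvMem_insert (m : Std.HashSet (Int × Int)) (a b : Int × Int) :
    b ∈ m.insert a ↔ b = a ∨ b ∈ m := by
  rw [Std.HashSet.mem_insert]
  simp only [beq_iff_eq]
  constructor
  · rintro (rfl | h)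
    · exact Or.inl rfl
    · exact Or.inr h
  · rintro (rfl | h)
    · exact Or.inl rfl
    · exact Or.inr h

theorem pvMem_ofList_singleton (a b : Int × Int) :
    b ∈ Std.HashSet.ofList [a] ↔ b = a := by
  rw [Std.HashSet.mem_ofList]
  simp only [List.contains_cons, List.contains_nil, Bool.or_false, beq_iff_eq]

theorem pvFoldInsert_mem (l : List (Int × Int)) :
    ∀ (m : Std.HashSet (Int × Int)) (x : Int × Int),
    x ∈ l.foldl (fun r y => r.insert y) m ↔ x ∈ m ∨ x ∈ l := by
  induction l with
  | nil => intro m x; simp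
  | cons y l ih =>
    intro m x
    rw [List.foldl_cons, ih, pvMem_insert]
    simp only [List.mem_cons]
    tauto

theorem pvFoldInsert_size (l : List (Int × Int)) :
    ∀ (m : Std.HashSet (Int × Int)), l.Nodup → (∀ y ∈ l, y ∉ m) →
    (l.foldl (fun r y => r.insert y) m).size = m.size + l.length := by
  induction l with
  | nil => intro m _ _; simp
  | cons y l ih =>
    intro m hnd hfresh
    rw [List.foldl_cons,
      ih (m.insert y) (List.nodup_cons.1 hnd).2
        (fun z hz => by
          rw [pvMem_insert]
          rintro (rfl | hzm)
          · exact (List.nodup_cons.1 hnd).1 hz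
          · exact hfresh z (List.mem_cons_of_mem _ hz) hzm),
      Std.HashSet.size_insert]
    simp only [List.length_cons]
    rw [if_neg (by simpa using hfresh y List.mem_cons_self)]
    omega

theorem pvFold_none (target : Int × Int) (blocked : List (Int × Int)) (n : Int) (r c : Int)
    (ds : List (Int × Int)) : ds.foldl (pvStep target blocked n r c) none = none := by
  induction ds with
  | nil => rfl
  | cons d ds ih => simpa [pvStep] using ih

-- characterisation of A's inner 4-direction fold
theorem pvFold_spec (target : Int × Int) (blocked : List (Int × Int)) (n : Int) (p : Int × Int) :
    ∀ (ds : List (Int × Int)) (q : List (Int × Int)) (seen : Std.HashSet (Int × Int)),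
    (match ds.foldl (pvStep target blocked n p.1 p.2) (some (q, seen)) with
     | none => ∃ d ∈ ds, pvWrap n (p.1 + d.1, p.2 + d.2) = target
     | some (q2, seen2) =>
         (∀ d ∈ ds, pvWrap n (p.1 + d.1, p.2 + d.2) ≠ target) ∧
         ∃ new, q2 = q ++ new ∧
           (∀ x, x ∈ seen2 ↔ x ∈ seen ∨ x ∈ new) ∧
           seen2.size = seen.size + new.length ∧
           (∀ y ∈ new, (∃ d ∈ ds, y = pvWrap n (p.1 + d.1, p.2 + d.2)) ∧ y ∉ blocked ∧ y ∉ seen) ∧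
           new.Nodup ∧
           (∀ d ∈ ds, pvWrap n (p.1 + d.1, p.2 + d.2) = target ∨
             pvWrap n (p.1 + d.1, p.2 + d.2) ∈ blocked ∨ pvWrap n (p.1 + d.1, p.2 + d.2) ∈ seen2)) := by
  intro ds
  induction ds with
  | nil =>
    intro q seen
    exact ⟨fun d hd => absurd hd List.not_mem_nil, [], (List.append_nil q).symm,
      fun x => by simp only [List.not_mem_nil, or_false],
      rfl, fun y hy => absurd hy List.not_mem_nil, List.nodup_nil,
      fun d hd => absurd hd List.not_mem_nil⟩
  | cons d ds ih =>
    intro q seen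
    rw [List.foldl_cons]
    simp only [pvStep]
    by_cases ht : pvWrap n (p.1 + d.1, p.2 + d.2) = target
    · rw [if_pos ht, pvFold_none]
      exact ⟨d, List.mem_cons_self, ht⟩
    · rw [if_neg ht]
      by_cases hsk : pvWrap n (p.1 + d.1, p.2 + d.2) ∈ blocked ∨ pvWrap n (p.1 + d.1, p.2 + d.2) ∈ seen
      · rw [if_pos hsk]
        have H := ih q seen
        revert H
        cases hfold : ds.foldl (pvStep target blocked n p.1 p.2) (some (q, seen)) with
        | none =>
          rintro ⟨d', hd', hd'eq⟩
          exact ⟨d', List.mem_cons_of_mem _ hd', hd'eq⟩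
        | some acc =>
          obtain ⟨q2, seen2⟩ := acc
          rintro ⟨hnt, new, hq2, hmem, hsize, hnew, hnd, hcov⟩
          refine ⟨?_, new, hq2, hmem, hsize, ?_, hnd, ?_⟩
          · intro d' hd'
            rcases List.mem_cons.1 hd' with rfl | h
            · exact ht
            · exact hnt d' h
          · intro y hy
            obtain ⟨⟨d', hd', hy'⟩, hb, hs⟩ := hnew y hy
            exact ⟨⟨d', List.mem_cons_of_mem _ hd', hy'⟩, hb, hs⟩
          · intro d' hd'
            rcases List.mem_cons.1 hd' with rfl | h
            · rcases hsk with hb | hs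
              · exact Or.inr (Or.inl hb)
              · exact Or.inr (Or.inr ((hmem _).2 (Or.inl hs)))
            · exact hcov d' h
      · rw [if_neg hsk]
        push Not at hsk
        obtain ⟨hb, hs⟩ := hsk
        have H := ih (q ++ [pvWrap n (p.1 + d.1, p.2 + d.2)]) (seen.insert (pvWrap n (p.1 + d.1, p.2 + d.2)))
        revert H
        cases hfold : ds.foldl (pvStep target blocked n p.1 p.2)
            (some (q ++ [pvWrap n (p.1 + d.1, p.2 + d.2)], seen.insert (pvWrap n (p.1 + d.1, p.2 + d.2)))) with
        | none =>
          rintro ⟨d', hd', hd'eq⟩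
          exact ⟨d', List.mem_cons_of_mem _ hd', hd'eq⟩
        | some acc =>
          obtain ⟨q2, seen2⟩ := acc
          rintro ⟨hnt, new, hq2, hmem, hsize, hnew, hnd, hcov⟩
          have hins : ∀ x, x ∈ seen.insert (pvWrap n (p.1 + d.1, p.2 + d.2)) ↔
              x = pvWrap n (p.1 + d.1, p.2 + d.2) ∨ x ∈ seen := fun x => pvMem_insert _ _ _
          refine ⟨?_, pvWrap n (p.1 + d.1, p.2 + d.2) :: new, by simp [hq2], ?_, ?_, ?_, ?_, ?_⟩
          · intro d' hd'
            rcases List.mem_cons.1 hd' with rfl | h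
            · exact ht
            · exact hnt d' h
          · intro x
            rw [hmem x, hins x]
            simp only [List.mem_cons]
            tauto
          · rw [hsize, Std.HashSet.size_insert, if_neg (by simpa using hs)]
            simp only [List.length_cons]
            omega
          · intro y hy
            rcases List.mem_cons.1 hy with rfl | h
            · exact ⟨⟨d, List.mem_cons_self, rfl⟩, hb, hs⟩
            · obtain ⟨⟨d', hd', hy'⟩, hb', hs'⟩ := hnew y h
              refine ⟨⟨d', List.mem_cons_of_mem _ hd', hy'⟩, hb', fun hc => hs' ?_⟩
              exact (hins y).2 (Or.inr hc)
          · refine List.nodup_cons.2 ⟨fun hc => ?_, hnd⟩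
            obtain ⟨_, _, hs'⟩ := hnew _ hc
            exact hs' ((hins _).2 (Or.inl rfl))
          · intro d' hd'
            rcases List.mem_cons.1 hd' with rfl | h
            · exact Or.inr (Or.inr ((hmem _).2 (Or.inl ((hins _).2 (Or.inl rfl)))))
            · exact hcov d' h

-- A's BFS loop returns true iff the common reachability predicate holds
theorem pvBfs_iff (start target : Int × Int) (blocked : List (Int × Int)) (n : Int) (hn : n ≠ 0) :
    ∀ (fuel : Nat) (q : List (Int × Int)) (seen : Std.HashSet (Int × Int)),
    (∀ x ∈ seen, pvReach start blocked n x) →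
    (∀ x ∈ q, x ∈ seen) →
    (∀ x ∈ seen, x ∈ pvCells start n) →
    start ∈ seen →
    (∀ x, x ∈ seen → x ∉ q → ∀ y ∈ pvNbrs n x, y ≠ target ∧ (y ∈ blocked ∨ y ∈ seen)) →
    q.length + ((pvCells start n).card - seen.size) < fuel →
    (pvBfs target blocked n fuel q seen = true ↔ pvP start target blocked n) := by
  intro fuel
  induction fuel with
  | zero =>
    intro q seen _ _ _ _ _ hm
    omega
  | succ f ih =>
    intro q seen hreach hqs hcells hstart hproc hm
    rcases q with _ | ⟨p, q'⟩
    · simp only [pvBfs]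
      constructor
      · intro h; cases h
      · rintro ⟨x, hx, hxt⟩
        exfalso
        have hseen : ∀ z, pvReach start blocked n z → z ∈ seen := by
          intro z hz
          induction hz with
          | refl => exact hstart
          | tail h1 h2 ihz =>
            exact ((hproc _ ihz (by simp) _ h2.1).2).resolve_left h2.2
        exact (hproc x (hseen x hx) (by simp) target hxt).1 rfl
    · rw [pvBfs]
      have HF := pvFold_spec target blocked n p pvDirs q' seen
      revert HF
      cases hfold : pvDirs.foldl (pvStep target blocked n p.1 p.2) (some (q', seen)) with
      | none =>
        rintro ⟨d, hd, hdt⟩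
        exact iff_of_true rfl ⟨p, hreach p (hqs p (by simp)), hdt ▸ List.mem_map.2 ⟨d, hd, rfl⟩⟩
      | some acc =>
        obtain ⟨q2, seen2⟩ := acc
        rintro ⟨hnt, new, hq2, hmem, hsize, hnew, hndnew, hcov⟩
        subst hq2
        have hreachp : pvReach start blocked n p := hreach p (hqs p (by simp))
        have hnewreach : ∀ y ∈ new, pvReach start blocked n y := by
          intro y hy
          obtain ⟨⟨d, hd, rfl⟩, hb, _⟩ := hnew y hy
          exact Relation.ReflTransGen.tail hreachp ⟨List.mem_map.2 ⟨d, hd, rfl⟩, hb⟩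
        have hcells2 : ∀ x ∈ seen2, x ∈ pvCells start n := by
          intro x hx
          rcases (hmem x).1 hx with hx | hx
          · exact hcells x hx
          · obtain ⟨⟨d, hd, rfl⟩, _, _⟩ := hnew x hx
            exact pvWrap_mem_cells _ start n hn
        have hlen2 := pvSize_le_card seen2 (pvCells start n) hcells2
        apply ih (q' ++ new) seen2
        · intro x hx
          rcases (hmem x).1 hx with hx | hx
          · exact hreach x hx
          · exact hnewreach x hx
        · intro x hx
          rcases List.mem_append.1 hx with hx | hx
          · exact (hmem x).2 (Or.inl (hqs x (List.mem_cons_of_mem _ hx)))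
          · exact (hmem x).2 (Or.inr hx)
        · exact hcells2
        · exact (hmem start).2 (Or.inl hstart)
        · intro x hx hxq y hy
          rcases (hmem x).1 hx with hxs | hxn
          · by_cases hxp : x = p
            · subst hxp
              obtain ⟨d, hd, rfl⟩ := List.mem_map.1 hy
              refine ⟨hnt d hd, ?_⟩
              rcases hcov d hd with h | h | h
              · exact absurd h (hnt d hd)
              · exact Or.inl h
              · exact Or.inr h
            · have hxq' : x ∉ p :: q' := by
                intro hc
                rcases List.mem_cons.1 hc with rfl | hc
                · exact hxp rfl
                · exact hxq (List.mem_append_left _ hc)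
              obtain ⟨h1, h2⟩ := hproc x hxs hxq' y hy
              exact ⟨h1, h2.imp id (fun hz => (hmem y).2 (Or.inl hz))⟩
          · exact absurd (List.mem_append_right _ hxn) hxq
        · simp only [List.length_append, List.length_cons] at hm ⊢
          omega

-- characterisation of B's frontier expansion
theorem pvExpand_spec (blocked : List (Int × Int)) (n : Int) (frontier : List (Int × Int))
    (reach : Std.HashSet (Int × Int)) :
    (∀ y, y ∈ pvExpand blocked n frontier reach ↔
      ((∃ x ∈ frontier, y ∈ pvNbrs n x) ∧ y ∉ blocked ∧ y ∉ reach)) ∧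
    (pvExpand blocked n frontier reach).Nodup := by
  have inner : ∀ (ys acc : List (Int × Int)),
      (∀ z, z ∈ ys.foldl (fun acc y => if y ∈ blocked ∨ y ∈ reach ∨ y ∈ acc then acc else acc ++ [y]) acc ↔
        z ∈ acc ∨ (z ∈ ys ∧ z ∉ blocked ∧ z ∉ reach)) ∧
      (acc.Nodup → (ys.foldl (fun acc y => if y ∈ blocked ∨ y ∈ reach ∨ y ∈ acc then acc else acc ++ [y]) acc).Nodup) := by
    intro ys
    induction ys with
    | nil => intro acc; simp
    | cons y ys ih =>
      intro acc
      rw [List.foldl_cons]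
      by_cases h : y ∈ blocked ∨ y ∈ reach ∨ y ∈ acc
      · rw [if_pos h]
        obtain ⟨ihm, ihn⟩ := ih acc
        refine ⟨fun z => ?_, ihn⟩
        rw [ihm z]
        simp only [List.mem_cons]
        constructor
        · rintro (hz | ⟨h1, h2, h3⟩)
          · exact Or.inl hz
          · exact Or.inr ⟨Or.inr h1, h2, h3⟩
        · rintro (hz | ⟨rfl | h1, h2, h3⟩)
          · exact Or.inl hz
          · rcases h with hb | hr | ha
            · exact absurd hb h2
            · exact absurd hr h3
            · exact Or.inl ha
          · exact Or.inr ⟨h1, h2, h3⟩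
      · rw [if_neg h]
        push Not at h
        obtain ⟨ihm, ihn⟩ := ih (acc ++ [y])
        constructor
        · intro z
          rw [ihm z]
          simp only [List.mem_append, List.mem_cons, List.not_mem_nil, or_false]
          constructor
          · rintro ((hz | rfl) | ⟨h1, h2, h3⟩)
            · exact Or.inl hz
            · exact Or.inr ⟨Or.inl rfl, h.1, h.2.1⟩
            · exact Or.inr ⟨Or.inr h1, h2, h3⟩
          · rintro (hz | ⟨rfl | h1, h2, h3⟩)
            · exact Or.inl (Or.inl hz)
            · exact Or.inl (Or.inr rfl)
            · exact Or.inr ⟨h1, h2, h3⟩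
        · intro hnd
          refine ihn (hnd.append (List.nodup_singleton y) ?_)
          intro a ha hb
          rw [List.mem_singleton] at hb
          subst hb
          exact h.2.2 ha
  have outer : ∀ (xs acc : List (Int × Int)),
      (∀ z, z ∈ xs.foldl (fun acc x => (pvNbrs n x).foldl
          (fun acc y => if y ∈ blocked ∨ y ∈ reach ∨ y ∈ acc then acc else acc ++ [y]) acc) acc ↔
        z ∈ acc ∨ ((∃ x ∈ xs, z ∈ pvNbrs n x) ∧ z ∉ blocked ∧ z ∉ reach)) ∧
      (acc.Nodup → (xs.foldl (fun acc x => (pvNbrs n x).foldl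
          (fun acc y => if y ∈ blocked ∨ y ∈ reach ∨ y ∈ acc then acc else acc ++ [y]) acc) acc).Nodup) := by
    intro xs
    induction xs with
    | nil => intro acc; simp
    | cons x xs ih =>
      intro acc
      rw [List.foldl_cons]
      obtain ⟨im, inn⟩ := inner (pvNbrs n x) acc
      obtain ⟨ihm, ihn⟩ := ih ((pvNbrs n x).foldl
          (fun acc y => if y ∈ blocked ∨ y ∈ reach ∨ y ∈ acc then acc else acc ++ [y]) acc)
      refine ⟨fun z => ?_, fun hnd => ihn (inn hnd)⟩
      rw [ihm z, im z]
      simp only [List.mem_cons]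
      constructor
      · rintro ((hz | ⟨h1, h2, h3⟩) | ⟨⟨w, hw, hzw⟩, h2, h3⟩)
        · exact Or.inl hz
        · exact Or.inr ⟨⟨x, Or.inl rfl, h1⟩, h2, h3⟩
        · exact Or.inr ⟨⟨w, Or.inr hw, hzw⟩, h2, h3⟩
      · rintro (hz | ⟨⟨w, (rfl | hw), hzw⟩, h2, h3⟩)
        · exact Or.inl (Or.inl hz)
        · exact Or.inl (Or.inr ⟨hzw, h2, h3⟩)
        · exact Or.inr ⟨⟨w, hw, hzw⟩, h2, h3⟩
  obtain ⟨om, onn⟩ := outer frontier []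
  refine ⟨fun y => ?_, onn List.nodup_nil⟩
  rw [show pvExpand blocked n frontier reach = frontier.foldl (fun acc x => (pvNbrs n x).foldl
      (fun acc y => if y ∈ blocked ∨ y ∈ reach ∨ y ∈ acc then acc else acc ++ [y]) acc) [] from rfl]
  rw [om y]
  simp

-- B's saturation loop returns true iff the common reachability predicate holds
theorem pvSatB_iff (start target : Int × Int) (blocked : List (Int × Int)) (n : Int) (hn : n ≠ 0) :
    ∀ (fuel : Nat) (frontier : List (Int × Int)) (reach : Std.HashSet (Int × Int)),
    (∀ x ∈ reach, pvReach start blocked n x) →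
    (∀ x ∈ frontier, x ∈ reach) →
    (∀ x ∈ reach, x ∈ pvCells start n) →
    start ∈ reach →
    (∀ x ∈ reach, x ∉ frontier → ∀ y, pvStepR blocked n x y → y ∈ reach) →
    (∀ x ∈ reach, x ∉ frontier → target ∉ pvNbrs n x) →
    (pvCells start n).card + 2 - reach.size ≤ fuel →
    (pvSatB target blocked n fuel frontier reach = true ↔ pvP start target blocked n) := by
  intro fuel
  induction fuel with
  | zero =>
    intro frontier reach _ _ hcells _ _ _ hm
    have := pvSize_le_card reach (pvCells start n) hcells
    omega
  | succ f ih =>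
    intro frontier reach hreach hfr hcells hstart hclosed hchk hm
    by_cases hfe : frontier = []
    · rw [pvSatB, if_pos hfe]
      refine iff_of_false (by simp) ?_
      rintro ⟨x, hx, hxt⟩
      have hall : ∀ z, pvReach start blocked n z → z ∈ reach := by
        intro z hz
        induction hz with
        | refl => exact hstart
        | tail h1 h2 ihz => exact hclosed _ ihz (by simp [hfe]) _ h2
      exact hchk x (hall x hx) (by simp [hfe]) hxt
    · rw [pvSatB, if_neg hfe]
      by_cases hany : frontier.any (fun x => decide (target ∈ pvNbrs n x)) = true
      · rw [if_pos hany]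
        obtain ⟨x, hxf, hxt⟩ := List.any_eq_true.1 hany
        exact iff_of_true rfl ⟨x, hreach x (hfr x hxf), by simpa using hxt⟩
      · rw [if_neg hany]
        have hnadj : ∀ x ∈ frontier, target ∉ pvNbrs n x := by
          intro x hx hc
          exact hany (List.any_eq_true.2 ⟨x, hx, by simpa using hc⟩)
        obtain ⟨Hmem, Hnd⟩ := pvExpand_spec blocked n frontier reach
        by_cases hne : pvExpand blocked n frontier reach = []
        · have hlen := pvSize_le_card reach (pvCells start n) hcells
          obtain ⟨f', rfl⟩ : ∃ f', f = f' + 1 := ⟨f - 1, by omega⟩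
          rw [hne, List.foldl_nil, pvSatB, if_pos rfl]
          have hcl : ∀ x ∈ reach, ∀ y, pvStepR blocked n x y → y ∈ reach := by
            intro x hx y hy
            by_cases hxf : x ∈ frontier
            · by_contra hyr
              have : y ∈ pvExpand blocked n frontier reach := (Hmem y).2 ⟨⟨x, hxf, hy.1⟩, hy.2, hyr⟩
              simp [hne] at this
            · exact hclosed x hx hxf y hy
          refine iff_of_false (by simp) ?_
          rintro ⟨x, hx, hxt⟩
          have hall : ∀ z, pvReach start blocked n z → z ∈ reach := by
            intro z hz
            induction hz with
            | refl => exact hstart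
            | tail h1 h2 ihz => exact hcl _ ihz _ h2
          by_cases hxf : x ∈ frontier
          · exact hnadj x hxf hxt
          · exact hchk x (hall x hx) hxf hxt
        · have hfresh : ∀ y ∈ pvExpand blocked n frontier reach, y ∉ reach :=
            fun y hy => ((Hmem y).1 hy).2.2
          have hnewlen : 0 < (pvExpand blocked n frontier reach).length :=
            List.length_pos_of_ne_nil hne
          have hmem2 := pvFoldInsert_mem (pvExpand blocked n frontier reach) (m := reach)
          have hsize2 := pvFoldInsert_size (pvExpand blocked n frontier reach) reach Hnd hfresh
          have hcells2 : ∀ x ∈ (pvExpand blocked n frontier reach).foldl (fun r y => r.insert y) reach,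
              x ∈ pvCells start n := by
            intro x hx
            rcases (hmem2 x).1 hx with hx | hx
            · exact hcells x hx
            · obtain ⟨⟨w, hw, hxw⟩, _, _⟩ := (Hmem x).1 hx
              obtain ⟨d, hd, rfl⟩ := List.mem_map.1 hxw
              exact pvWrap_mem_cells _ start n hn
          have hlen2 := pvSize_le_card _ (pvCells start n) hcells2
          apply ih
          · intro x hx
            rcases (hmem2 x).1 hx with hx | hx
            · exact hreach x hx
            · obtain ⟨⟨w, hw, hxw⟩, hb, _⟩ := (Hmem x).1 hx
              exact Relation.ReflTransGen.tail (hreach w (hfr w hw)) ⟨hxw, hb⟩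
          · intro x hx
            exact (hmem2 x).2 (Or.inr hx)
          · exact hcells2
          · exact (hmem2 start).2 (Or.inl hstart)
          · intro x hx hxf y hy
            rcases (hmem2 x).1 hx with hx | hx
            · by_cases hxfr : x ∈ frontier
              · by_cases hyr : y ∈ reach
                · exact (hmem2 y).2 (Or.inl hyr)
                · exact (hmem2 y).2 (Or.inr ((Hmem y).2 ⟨⟨x, hxfr, hy.1⟩, hy.2, hyr⟩))
              · exact (hmem2 y).2 (Or.inl (hclosed x hx hxfr y hy))
            · exact absurd hx hxf
          · intro x hx hxn
            rcases (hmem2 x).1 hx with hx | hx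
            · by_cases hxfr : x ∈ frontier
              · exact hnadj x hxfr
              · exact hchk x hx hxfr
            · exact absurd hx hxn
          · rw [hsize2]
            omega

-- ===== VERDICT (by name: the statement is the Claim_ definition above) =====
theorem path_exists_wrap_spec : Claim_equal_path_exists_wrap := by
  intro start target blocked n _ hpre
  unfold Spec_path_exists_wrap
  simp only [path_exists_wrap, path_exists_wrap_alt]
  by_cases hst : start = target
  · rw [if_pos hst, if_pos hst]
  · rw [if_neg hst, if_neg hst]
    have hn : n ≠ 0 := hpre.resolve_left hst
    have hcard := pvCells_card_le start n
    have hstc : start ∈ pvCells start n := Finset.mem_insert_self _ _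
    have hsmem : start ∈ Std.HashSet.ofList [start] := (pvMem_ofList_singleton start start).2 rfl
    have hspos : 0 < (Std.HashSet.ofList [start] : Std.HashSet (Int × Int)).size := by
      rw [← Std.HashSet.length_toList]
      exact List.length_pos_of_mem (Std.HashSet.mem_toList.2 hsmem)
    have hA := pvBfs_iff start target blocked n hn (n.natAbs * n.natAbs + 2) [start]
      (Std.HashSet.ofList [start])
      (by intro x hx; rw [pvMem_ofList_singleton] at hx; subst hx; exact Relation.ReflTransGen.refl)
      (by intro x hx; rw [List.mem_singleton] at hx; subst hx; exact hsmem)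
      (by intro x hx; rw [pvMem_ofList_singleton] at hx; subst hx; exact hstc)
      hsmem
      (by intro x hx hxq y hy
          exfalso
          rw [pvMem_ofList_singleton] at hx
          exact hxq (hx ▸ List.mem_singleton.2 rfl))
      (by simp only [List.length_singleton]; omega)
    have hB := pvSatB_iff start target blocked n hn (n.natAbs * n.natAbs + 3) [start]
      (Std.HashSet.ofList [start])
      (by intro x hx; rw [pvMem_ofList_singleton] at hx; subst hx; exact Relation.ReflTransGen.refl)
      (by intro x hx; rw [List.mem_singleton] at hx; subst hx; exact hsmem)
      (by intro x hx; rw [pvMem_ofList_singleton] at hx; subst hx; exact hstc)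
      hsmem
      (by intro x hx hxf y hy
          exfalso
          rw [pvMem_ofList_singleton] at hx
          exact hxf (hx ▸ List.mem_singleton.2 rfl))
      (by intro x hx hxf
          exfalso
          rw [pvMem_ofList_singleton] at hx
          exact hxf (hx ▸ List.mem_singleton.2 rfl))
      (by omega)
    by_cases hP : pvP start target blocked n
    · rw [hA.mpr hP, hB.mpr hP]
    · rw [Bool.eq_false_iff.mpr (fun h => hP (hA.mp h)),
        Bool.eq_false_iff.mpr (fun h => hP (hB.mp h))]
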